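-- pv_equiv track=rewrite | github.com/flipphillips/p4bot | Docker/app/p4status.py | parse_opened
-- ===== SOURCE A (Python) =====
-- from typing import Dict, List, Optional, Tuple, Any
--
-- def parse_records(output: str, start_key: str) -> List[Dict[str, str]]:
--     """Parse p4 tagged output into records starting with start_key."""
--     records = []
--     current = None
--     for raw_line in output.splitlines():
--         if not raw_line.startswith("... "):
--             continue
--         parts = raw_line[4:].split(" ", 1)
--         key = parts[0]
--         value = parts[1] if len(parts) > 1 else ""
--         if key == start_key:
--             if current:
--                 records.append(current)
--             current = {key: value}
--         else:
--             if current is None: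
--                 current = {}
--             current[key] = value
--     if current:
--         records.append(current)
--     return records
--
-- def parse_opened(output: str) -> List[Dict[str, Optional[str]]]:
--     """Parse p4 opened output into structured data."""
--     records = parse_records(output, "depotFile")
--     opened = []
--     for record in records:
--         opened.append({
--             "file": record.get("depotFile", ""),
--             "user": record.get("user"),
--             "client": record.get("client"),
--             "host": record.get("host"),
--             "action": record.get("action"),
--             "change": record.get("change"),
--             "type": record.get("type"),
--         })
--     return opened
-- ===== SOURCE B (Python) =====
-- FIELDS = {"user": "user", "client": "client", "host": "host",
--           "action": "action", "change": "change", "type": "type"}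
--
-- def _fresh(file_value):
--     return {"file": file_value, "user": None, "client": None, "host": None,
--             "action": None, "change": None, "type": None}
--
-- def parse_opened(output):
--     """Single pass: build the final structured dicts directly, no intermediate records."""
--     opened = []
--     current = None
--     for line in output.splitlines():
--         if not line.startswith("... "):
--             continue
--         parts = line[4:].split(" ", 1)
--         key = parts[0]
--         value = parts[1] if len(parts) > 1 else ""
--         if key == "depotFile":
--             if current is not None:
--                 opened.append(current)
--             current = _fresh(value)
--         else:
--             if current is None:
--                 current = _fresh("")
--             name = FIELDS.get(key)
--             if name is not None:
--                 current[name] = value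
--     if current is not None:
--         opened.append(current)
--     return opened
-- ===== Notes on version B (the rewrite author's own statement) =====
-- stated objective: simpler
-- what changed: B replaces A's two-phase pipeline (generic record grouping in parse_records, then a projection pass over the records) with a single loop over the lines that builds the final structured dicts directly, dropping the intermediate generic-record representation.
import Mathlib
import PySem

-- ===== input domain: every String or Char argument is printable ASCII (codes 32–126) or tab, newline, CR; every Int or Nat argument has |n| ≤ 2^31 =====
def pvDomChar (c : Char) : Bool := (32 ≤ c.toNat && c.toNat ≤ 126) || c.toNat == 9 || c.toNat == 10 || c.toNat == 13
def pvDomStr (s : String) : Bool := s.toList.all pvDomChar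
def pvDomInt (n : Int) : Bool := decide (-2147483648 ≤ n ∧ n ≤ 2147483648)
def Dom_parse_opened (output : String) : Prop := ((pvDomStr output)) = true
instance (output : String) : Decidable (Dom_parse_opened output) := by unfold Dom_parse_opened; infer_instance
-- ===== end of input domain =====

-- B replaces A's two-phase pipeline (generic record grouping, then a projection pass) by one pass
-- that builds the final structured rows directly; objective: simpler decomposition, same cost.

-- ===== PORT A =====
-- parts = raw_line[4:].split(" ", 1); key = parts[0]; value = parts[1] if len(parts) > 1 else ""
-- sep " " ≠ "" so splitMax? never returns none, and split always yields ≥ 1 part, so the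
-- .getD []/.headD "" defaults are unreachable (no Python exception is possible here)
def pvLineKVA (rawLine : String) : String × String :=
  let parts := (PySem.Str.splitMax? (PySem.Str.slice rawLine (some 4) none) " " 1).getD []
  (parts.headD "", if parts.length > 1 then parts.getD 1 "" else "")

-- one iteration of the parse_records loop over (records, current)
def pvStepA (startKey : String)
    (st : List (PySem.Dict String String) × Option (PySem.Dict String String)) (rawLine : String) :
    List (PySem.Dict String String) × Option (PySem.Dict String String) :=
  if PySem.Str.startswith rawLine "... " then
    if (pvLineKVA rawLine).1 == startKey then
      -- `if current:` — falsy for None and for an empty dict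
      (match st.2 with
       | some d => if d.items.isEmpty then st.1 else st.1 ++ [d]
       | none => st.1,
       some (PySem.Dict.ofList [((pvLineKVA rawLine).1, (pvLineKVA rawLine).2)]))
    else
      ((st.1),
       some ((match st.2 with
              | some d => d
              | none => PySem.Dict.empty).insert (pvLineKVA rawLine).1 (pvLineKVA rawLine).2))
  else st

def pvParseRecords (output : String) (startKey : String) : List (PySem.Dict String String) :=
  let st := (PySem.Str.splitlines output).foldl (pvStepA startKey) ([], none)
  match st.2 with
  | some d => if d.items.isEmpty then st.1 else st.1 ++ [d]
  | none => st.1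

def parse_opened (output : String) : List (List (String × Option String)) :=
  let records := pvParseRecords output "depotFile"
  records.foldl (fun opened record =>
    opened ++ [[("file", some (record.getD "depotFile" "")),
                ("user", record.get? "user"),
                ("client", record.get? "client"),
                ("host", record.get? "host"),
                ("action", record.get? "action"),
                ("change", record.get? "change"),
                ("type", record.get? "type")]]) []

-- ===== PORT B =====
def pvFields : PySem.Dict String String :=
  PySem.Dict.ofList [("user", "user"), ("client", "client"), ("host", "host"),
                     ("action", "action"), ("change", "change"), ("type", "type")]

def pvFresh (fileValue : String) : PySem.Dict String (Option String) :=
  PySem.Dict.ofList [("file", some fileValue), ("user", none), ("client", none), ("host", none),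
                     ("action", none), ("change", none), ("type", none)]

-- parts = line[4:].split(" ", 1); key = parts[0]; value = parts[1] if len(parts) > 1 else ""
def pvLineKVB (rawLine : String) : String × String :=
  let parts := (PySem.Str.splitMax? (PySem.Str.slice rawLine (some 4) none) " " 1).getD []
  (parts.headD "", if parts.length > 1 then parts.getD 1 "" else "")

-- one iteration of B's single loop over (opened, current)
def pvStepB
    (st : List (List (String × Option String)) × Option (PySem.Dict String (Option String)))
    (rawLine : String) :
    List (List (String × Option String)) × Option (PySem.Dict String (Option String)) :=
  if PySem.Str.startswith rawLine "... " then
    if (pvLineKVB rawLine).1 == "depotFile" then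
      (match st.2 with
       | some d => st.1 ++ [d.items]
       | none => st.1,
       some (pvFresh (pvLineKVB rawLine).2))
    else
      ((st.1),
       some (match pvFields.get? (pvLineKVB rawLine).1 with
             | some name => (match st.2 with
                             | some d => d
                             | none => pvFresh "").insert name (some (pvLineKVB rawLine).2)
             | none => match st.2 with
                       | some d => d
                       | none => pvFresh ""))
  else st

def parse_opened_alt (output : String) : List (List (String × Option String)) :=
  let st := (PySem.Str.splitlines output).foldl pvStepB ([], none)
  match st.2 with
  | some d => st.1 ++ [d.items]
  | none => st.1

-- ===== PRECONDITION & SPEC =====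
def Spec_parse_opened (output : String) (out : List (List (String × Option String))) : Prop := out = parse_opened_alt output
instance (output : String) (out : List (List (String × Option String))) : Decidable (Spec_parse_opened output out) := by unfold Spec_parse_opened; infer_instance

-- ===== CLAIM (what is proved, stated in full; the proofs are below) =====
def Claim_equal_parse_opened : Prop := ∀ (output : String), Dom_parse_opened output → Spec_parse_opened output (parse_opened output)

-- ===== LEMMAS AND PROOFS =====

-- the projection A applies to a finished record, as the 7-pair output row
def pvProj (r : PySem.Dict String String) : List (String × Option String) :=
  [("file", some (r.getD "depotFile" "")), ("user", r.get? "user"), ("client", r.get? "client"),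
   ("host", r.get? "host"), ("action", r.get? "action"), ("change", r.get? "change"),
   ("type", r.get? "type")]

-- invariant tying A's generic current record to B's structured current dict
def pvInv (cur : Option (PySem.Dict String String))
    (curB : Option (PySem.Dict String (Option String))) : Prop :=
  match cur with
  | none => curB = none
  | some d => d.items ≠ [] ∧ curB = some (PySem.Dict.mk (pvProj d))

theorem pv_items_insert_ne_nil (d : PySem.Dict String String) (k v : String) :
    (d.insert k v).items ≠ [] := by
  cases d with | mk l =>
  induction l with
  | nil => simp [PySem.Dict.insert]
  | cons p t ih =>
    simp only [PySem.Dict.insert] at *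
    split <;> simp_all

theorem pv_proj_insert_user (d : PySem.Dict String String) (v : String) :
    PySem.Dict.mk (pvProj (d.insert "user" v)) = (PySem.Dict.mk (pvProj d)).insert "user" (some v) := by
  have hR : ((PySem.Dict.mk (pvProj d)).insert "user" (some v)).items =
      [("file", some (d.getD "depotFile" "")), ("user", some v), ("client", d.get? "client"), ("host", d.get? "host"), ("action", d.get? "action"), ("change", d.get? "change"), ("type", d.get? "type")] := by
    simp [pvProj, PySem.Dict.insert]
  apply PySem.Dict.ext
  rw [hR]
  simp [pvProj, PySem.Dict.get?_insert, PySem.Dict.getD_insert]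

theorem pv_proj_insert_client (d : PySem.Dict String String) (v : String) :
    PySem.Dict.mk (pvProj (d.insert "client" v)) = (PySem.Dict.mk (pvProj d)).insert "client" (some v) := by
  have hR : ((PySem.Dict.mk (pvProj d)).insert "client" (some v)).items =
      [("file", some (d.getD "depotFile" "")), ("user", d.get? "user"), ("client", some v), ("host", d.get? "host"), ("action", d.get? "action"), ("change", d.get? "change"), ("type", d.get? "type")] := by
    simp [pvProj, PySem.Dict.insert]
  apply PySem.Dict.ext
  rw [hR]
  simp [pvProj, PySem.Dict.get?_insert, PySem.Dict.getD_insert]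

theorem pv_proj_insert_host (d : PySem.Dict String String) (v : String) :
    PySem.Dict.mk (pvProj (d.insert "host" v)) = (PySem.Dict.mk (pvProj d)).insert "host" (some v) := by
  have hR : ((PySem.Dict.mk (pvProj d)).insert "host" (some v)).items =
      [("file", some (d.getD "depotFile" "")), ("user", d.get? "user"), ("client", d.get? "client"), ("host", some v), ("action", d.get? "action"), ("change", d.get? "change"), ("type", d.get? "type")] := by
    simp [pvProj, PySem.Dict.insert]
  apply PySem.Dict.ext
  rw [hR]
  simp [pvProj, PySem.Dict.get?_insert, PySem.Dict.getD_insert]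

theorem pv_proj_insert_action (d : PySem.Dict String String) (v : String) :
    PySem.Dict.mk (pvProj (d.insert "action" v)) = (PySem.Dict.mk (pvProj d)).insert "action" (some v) := by
  have hR : ((PySem.Dict.mk (pvProj d)).insert "action" (some v)).items =
      [("file", some (d.getD "depotFile" "")), ("user", d.get? "user"), ("client", d.get? "client"), ("host", d.get? "host"), ("action", some v), ("change", d.get? "change"), ("type", d.get? "type")] := by
    simp [pvProj, PySem.Dict.insert]
  apply PySem.Dict.ext
  rw [hR]
  simp [pvProj, PySem.Dict.get?_insert, PySem.Dict.getD_insert]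

theorem pv_proj_insert_change (d : PySem.Dict String String) (v : String) :
    PySem.Dict.mk (pvProj (d.insert "change" v)) = (PySem.Dict.mk (pvProj d)).insert "change" (some v) := by
  have hR : ((PySem.Dict.mk (pvProj d)).insert "change" (some v)).items =
      [("file", some (d.getD "depotFile" "")), ("user", d.get? "user"), ("client", d.get? "client"), ("host", d.get? "host"), ("action", d.get? "action"), ("change", some v), ("type", d.get? "type")] := by
    simp [pvProj, PySem.Dict.insert]
  apply PySem.Dict.ext
  rw [hR]
  simp [pvProj, PySem.Dict.get?_insert, PySem.Dict.getD_insert]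

theorem pv_proj_insert_type (d : PySem.Dict String String) (v : String) :
    PySem.Dict.mk (pvProj (d.insert "type" v)) = (PySem.Dict.mk (pvProj d)).insert "type" (some v) := by
  have hR : ((PySem.Dict.mk (pvProj d)).insert "type" (some v)).items =
      [("file", some (d.getD "depotFile" "")), ("user", d.get? "user"), ("client", d.get? "client"), ("host", d.get? "host"), ("action", d.get? "action"), ("change", d.get? "change"), ("type", some v)] := by
    simp [pvProj, PySem.Dict.insert]
  apply PySem.Dict.ext
  rw [hR]
  simp [pvProj, PySem.Dict.get?_insert, PySem.Dict.getD_insert]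

theorem pv_proj_insert_untracked (d : PySem.Dict String String) (k v : String)
    (h1 : k ≠ "depotFile") (h2 : k ≠ "user") (h3 : k ≠ "client") (h4 : k ≠ "host")
    (h5 : k ≠ "action") (h6 : k ≠ "change") (h7 : k ≠ "type") :
    PySem.Dict.mk (pvProj (d.insert k v)) = PySem.Dict.mk (pvProj d) := by
  simp [pvProj, PySem.Dict.get?_insert, PySem.Dict.getD_insert, Ne.symm h1, Ne.symm h2,
    Ne.symm h3, Ne.symm h4, Ne.symm h5, Ne.symm h6, Ne.symm h7]

theorem pv_proj_depot (v : String) :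
    PySem.Dict.mk (pvProj (PySem.Dict.ofList [("depotFile", v)])) = pvFresh v := by
  simp [pvProj, pvFresh, PySem.Dict.ofList, PySem.Dict.update, PySem.Dict.insert,
    PySem.Dict.get?, PySem.Dict.getD, PySem.Dict.contains, PySem.Dict.empty]

theorem pv_proj_empty : PySem.Dict.mk (pvProj PySem.Dict.empty) = pvFresh "" := by
  decide

theorem pv_fields_untracked (k : String)
    (h2 : k ≠ "user") (h3 : k ≠ "client") (h4 : k ≠ "host")
    (h5 : k ≠ "action") (h6 : k ≠ "change") (h7 : k ≠ "type") :
    pvFields.get? k = none := by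
  simp [pvFields, PySem.Dict.ofList, PySem.Dict.update, PySem.Dict.insert, PySem.Dict.get?,
    PySem.Dict.contains, PySem.Dict.empty, Ne.symm h2, Ne.symm h3, Ne.symm h4, Ne.symm h5,
    Ne.symm h6, Ne.symm h7]

theorem pv_update (d0 : PySem.Dict String String) (dB : PySem.Dict String (Option String))
    (key value : String) (hdB : dB = PySem.Dict.mk (pvProj d0)) (hk : key ≠ "depotFile") :
    (match pvFields.get? key with
     | some name => dB.insert name (some value)
     | none => dB) = PySem.Dict.mk (pvProj (d0.insert key value)) := by
  subst hdB
  by_cases h2 : key = "user"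
  · subst h2; rw [show pvFields.get? "user" = some "user" from by decide]
    exact (pv_proj_insert_user d0 value).symm
  by_cases h3 : key = "client"
  · subst h3; rw [show pvFields.get? "client" = some "client" from by decide]
    exact (pv_proj_insert_client d0 value).symm
  by_cases h4 : key = "host"
  · subst h4; rw [show pvFields.get? "host" = some "host" from by decide]
    exact (pv_proj_insert_host d0 value).symm
  by_cases h5 : key = "action"
  · subst h5; rw [show pvFields.get? "action" = some "action" from by decide]
    exact (pv_proj_insert_action d0 value).symm
  by_cases h6 : key = "change"
  · subst h6; rw [show pvFields.get? "change" = some "change" from by decide]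
    exact (pv_proj_insert_change d0 value).symm
  by_cases h7 : key = "type"
  · subst h7; rw [show pvFields.get? "type" = some "type" from by decide]
    exact (pv_proj_insert_type d0 value).symm
  · rw [pv_fields_untracked key h2 h3 h4 h5 h6 h7]
    exact (pv_proj_insert_untracked d0 key value hk h2 h3 h4 h5 h6 h7).symm

theorem pv_step (recs : List (PySem.Dict String String)) (cur : Option (PySem.Dict String String))
    (opn : List (List (String × Option String))) (curB : Option (PySem.Dict String (Option String)))
    (line : String) (hmap : opn = recs.map pvProj) (hinv : pvInv cur curB) :
    (pvStepB (opn, curB) line).1 = (pvStepA "depotFile" (recs, cur) line).1.map pvProj ∧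
    pvInv (pvStepA "depotFile" (recs, cur) line).2 (pvStepB (opn, curB) line).2 := by
  unfold pvStepA pvStepB
  by_cases hs : PySem.Str.startswith line "... " = true
  · rw [if_pos hs, if_pos hs]
    rw [show pvLineKVB = pvLineKVA from rfl]
    generalize (pvLineKVA line).1 = key
    generalize (pvLineKVA line).2 = value
    by_cases hk : key = "depotFile"
    · subst hk
      simp only [beq_self_eq_true]
      simp only [if_true]
      cases cur with
      | none =>
        have hB : curB = none := hinv
        subst hB
        refine ⟨hmap, ?_, ?_⟩
        · simp [PySem.Dict.ofList, PySem.Dict.update, PySem.Dict.insert, PySem.Dict.empty,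
            PySem.Dict.contains]
        · rw [pv_proj_depot]
      | some d =>
        obtain ⟨hne, hB⟩ := hinv
        subst hB
        have hie : d.items.isEmpty = false := by
          cases h : d.items with
          | nil => exact absurd h hne
          | cons a t => simp
        refine ⟨?_, ?_, ?_⟩
        · simp [hie, hmap]
        · simp [PySem.Dict.ofList, PySem.Dict.update, PySem.Dict.insert, PySem.Dict.empty,
            PySem.Dict.contains]
        · rw [pv_proj_depot]
    · have hkb : (key == "depotFile") = false := beq_eq_false_iff_ne.mpr hk
      rw [if_neg (by simp [hkb]), if_neg (by simp [hkb])]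
      cases cur with
      | none =>
        have hB : curB = none := hinv
        subst hB
        exact ⟨hmap, pv_items_insert_ne_nil _ _ _,
          by rw [pv_update PySem.Dict.empty (pvFresh "") key value pv_proj_empty.symm hk]⟩
      | some d =>
        obtain ⟨hne, hB⟩ := hinv
        subst hB
        exact ⟨hmap, pv_items_insert_ne_nil _ _ _,
          by rw [pv_update d (PySem.Dict.mk (pvProj d)) key value rfl hk]⟩
  · rw [if_neg hs, if_neg hs]
    exact ⟨hmap, hinv⟩

theorem pv_loop (lines : List String) (recs : List (PySem.Dict String String))
    (cur : Option (PySem.Dict String String)) (opn : List (List (String × Option String)))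
    (curB : Option (PySem.Dict String (Option String)))
    (hmap : opn = recs.map pvProj) (hinv : pvInv cur curB) :
    (lines.foldl pvStepB (opn, curB)).1 = (lines.foldl (pvStepA "depotFile") (recs, cur)).1.map pvProj ∧
    pvInv (lines.foldl (pvStepA "depotFile") (recs, cur)).2 (lines.foldl pvStepB (opn, curB)).2 := by
  induction lines generalizing recs cur opn curB with
  | nil => exact ⟨hmap, hinv⟩
  | cons l t ih =>
    obtain ⟨h1, h2⟩ := pv_step recs cur opn curB l hmap hinv
    simpa using ih _ _ _ _ h1 h2

-- ===== VERDICT (by name: the statement is the Claim_ definition above) =====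
theorem parse_opened_spec : Claim_equal_parse_opened := by
  intro output _
  unfold Spec_parse_opened parse_opened parse_opened_alt pvParseRecords
  obtain ⟨h1, h2⟩ := pv_loop (PySem.Str.splitlines output) [] none [] none rfl rfl
  rw [PySem.List.foldl_append_singleton_eq_map]
  rcases hA : ((PySem.Str.splitlines output).foldl (pvStepA "depotFile") ([], none)).2 with _ | d
  · rw [hA] at h2
    simp only [pvInv] at h2
    simp [hA, h2, h1, pvProj]
  · rw [hA] at h2
    simp only [pvInv] at h2
    obtain ⟨hne, hb⟩ := h2
    have hie : d.items.isEmpty = false := by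
      cases h : d.items with
      | nil => exact absurd h hne
      | cons a t => simp
    simp [hA, hb, hie, h1, pvProj]
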